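-- pv_equiv track=rewrite | github.com/dnwls16071/PS_Baekjoon | 8000~8999/8111.py | BFS
-- ===== SOURCE A (Python) =====
-- from collections import deque
--
-- def BFS(N):
--     queue = deque([(1, "1")])
--     visited = [False] * 20001
--     visited[1] = True
--
--     while queue:
--         current_num, current_str = queue.popleft()
--         # 만약 만들어진 현재 숫자가 N의 배수라면?
--         if current_num % N == 0:
--             return current_str
--         # 만약 구사과가 좋아하는 수의 길이가 100을 넘어선다면?
--         if len(current_str) > 100:
--             return "BRAK"
--         # 1을 뒤에 붙이는 경우
--         if not visited[((current_num * 10) + 1) % N]: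
--             visited[((current_num * 10) + 1) % N] = True
--             queue.append([(((current_num * 10) + 1) % N), current_str + "1"])
--         # 0을 뒤에 붙이는 경우
--         if not visited[(current_num * 10) % N]:
--             visited[(current_num * 10) % N] = True
--             queue.append([((current_num * 10) % N), current_str + "0"])
--     return "BRAK"
-- ===== SOURCE B (Python) =====
-- from collections import deque
--
-- def BFS(N):
--     # BFS over remainders storing only the remainder in the queue;
--     # parent/digit/length tables allow rebuilding the answer at the end.
--     par = [None] * 20001
--     dig = [''] * 20001
--     length = [0] * 20001
--     visited = [False] * 20001
--     visited[1] = True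
--     dig[1] = '1'
--     length[1] = 1
--     queue = deque([1])
--     while queue:
--         r = queue.popleft()
--         if r % N == 0:
--             out = []
--             while r is not None:
--                 out.append(dig[r])
--                 r = par[r]
--             return ''.join(reversed(out))
--         if length[r] > 100:
--             return "BRAK"
--         for d in (1, 0):
--             c = (r * 10 + d) % N
--             if not visited[c]:
--                 visited[c] = True
--                 par[c] = r
--                 dig[c] = str(d)
--                 length[c] = length[r] + 1
--                 queue.append(c)
--     return "BRAK"
-- ===== Notes on version B (the rewrite author's own statement) =====
-- stated objective: alternative
-- what changed: The BFS queue stores bare remainders instead of (remainder, digit-string) pairs: parent/digit/length tables indexed by remainder are filled on enqueue and the answer string is reconstructed once by backtracking parent pointers when a multiple is dequeued, instead of copying a growing string into every queue entry.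
-- outside the precondition, e.g. on BFS(0): A raises ZeroDivisionError, B raises ZeroDivisionError; on BFS(20002): A returns '100010', B returns '100010'; on BFS(-20002): A returns 'BRAK', B returns 'BRAK'
import Mathlib
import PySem

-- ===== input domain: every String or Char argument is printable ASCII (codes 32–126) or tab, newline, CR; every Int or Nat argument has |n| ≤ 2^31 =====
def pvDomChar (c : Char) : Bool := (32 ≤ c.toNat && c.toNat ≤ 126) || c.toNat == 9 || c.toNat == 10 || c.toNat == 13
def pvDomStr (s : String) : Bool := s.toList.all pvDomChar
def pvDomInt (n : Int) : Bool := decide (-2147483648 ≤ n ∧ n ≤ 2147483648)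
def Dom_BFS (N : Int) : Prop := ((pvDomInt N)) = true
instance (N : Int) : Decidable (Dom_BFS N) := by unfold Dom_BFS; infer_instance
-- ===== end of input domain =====

-- B replaces A's queue of (remainder, string) pairs by a queue of bare remainders with
-- parent/digit/length tables, rebuilding the answer string once at the end (objective: alternative).

-- ===== PORT A =====
def BFSloop (N : Int) (fuel : Nat) (queue : List (Int × List Char)) (visited : List Bool) : String :=
  match fuel with
  | 0 => "BRAK"
  | fuel + 1 =>
    match queue with
    | [] => "BRAK"
    | (num, s) :: rest =>
      if PySem.Int.mod num N = 0 then String.ofList s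
      else if (100 : Int) < (s.length : Int) then "BRAK"
      else
        let i1 : Int := PySem.Int.mod (num * 10 + 1) N
        let q1 := if PySem.List.pyGetD visited i1 false = false then rest ++ [(i1, s ++ ['1'])] else rest
        let v1 := if PySem.List.pyGetD visited i1 false = false then PySem.List.pySetD visited i1 true else visited
        let i0 : Int := PySem.Int.mod (num * 10) N
        let q0 := if PySem.List.pyGetD v1 i0 false = false then q1 ++ [(i0, s ++ ['0'])] else q1
        let v0 := if PySem.List.pyGetD v1 i0 false = false then PySem.List.pySetD v1 i0 true else v1
        BFSloop N fuel q0 v0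

def BFS (N : Int) : String :=
  BFSloop N 100000 [(1, ['1'])] (PySem.List.pySetD (List.replicate 20001 false) 1 true)

-- ===== PORT B =====
def reconLoop (par : List (Option Int)) (dig : List (List Char)) (fuel : Nat) (r : Int)
    (out : List (List Char)) : List (List Char) :=
  match fuel with
  | 0 => out
  | fuel + 1 =>
    let out' := out ++ [PySem.List.pyGetD dig r []]
    match PySem.List.pyGetD par r none with
    | none => out'
    | some p => reconLoop par dig fuel p out'

def stepB (N : Int) (r : Int)
    (st : List Int × List Bool × List (Option Int) × List (List Char) × List Int) (d : Int) :
    List Int × List Bool × List (Option Int) × List (List Char) × List Int :=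
  match st with
  | (q, vis, par, dig, lenT) =>
    let c : Int := PySem.Int.mod (r * 10 + d) N
    if PySem.List.pyGetD vis c false = false then
      (q ++ [c], PySem.List.pySetD vis c true, PySem.List.pySetD par c (some r),
       PySem.List.pySetD dig c (PySem.Int.toChars d),
       PySem.List.pySetD lenT c (PySem.List.pyGetD lenT r 0 + 1))
    else st

def BFSloopAlt (N : Int) (fuel : Nat) (queue : List Int) (vis : List Bool)
    (par : List (Option Int)) (dig : List (List Char)) (lenT : List Int) : String :=
  match fuel with
  | 0 => "BRAK"
  | fuel + 1 =>
    match queue with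
    | [] => "BRAK"
    | r :: rest =>
      if PySem.Int.mod r N = 0 then
        String.ofList (PySem.Chars.join [] (reconLoop par dig 100000 r []).reverse)
      else if (100 : Int) < PySem.List.pyGetD lenT r 0 then "BRAK"
      else
        match [1, 0].foldl (stepB N r) (rest, vis, par, dig, lenT) with
        | (q', vis', par', dig', lenT') => BFSloopAlt N fuel q' vis' par' dig' lenT'

def BFS_alt (N : Int) : String :=
  BFSloopAlt N 100000 [1]
    (PySem.List.pySetD (List.replicate 20001 false) 1 true)
    (List.replicate 20001 (none : Option Int))
    (PySem.List.pySetD (List.replicate 20001 ([] : List Char)) 1 ['1'])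
    (PySem.List.pySetD (List.replicate 20001 (0 : Int)) 1 1)

-- ===== PRECONDITION & SPEC =====
-- Pre_ excludes N = 0 (A raises ZeroDivisionError) and |N| > 20001, where remainders overrun
-- A's fixed 20001-slot visited table: most such N raise IndexError, and the cited few that
-- return a value before overrunning lie outside the table's design range (B does the same there).
def Pre_BFS (N : Int) : Prop := N ≠ 0 ∧ -20001 ≤ N ∧ N ≤ 20001
instance (N : Int) : Decidable (Pre_BFS N) := by unfold Pre_BFS; infer_instance
def pvWitness_BFS : Int := (7)
def Spec_BFS (N : Int) (out : String) : Prop := out = BFS_alt N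
instance (N : Int) (out : String) : Decidable (Spec_BFS N out) := by unfold Spec_BFS; infer_instance

-- ===== CLAIM (what is proved, stated in full; the proofs are below) =====
def Claim_equal_BFS : Prop := ∀ (N : Int), Dom_BFS N → Pre_BFS N → Spec_BFS N (BFS N)

-- ===== LEMMAS AND PROOFS =====

/-- The slot of Python index `i` in a 20001-element table (negative indices wrap). -/
def pvSlot (i : Int) : Nat := if 0 ≤ i then i.toNat else (i + 20001).toNat

theorem pvSlot_lt (i : Int) (h1 : -20001 ≤ i) (h2 : i ≤ 20000) : pvSlot i < 20001 := by
  unfold pvSlot; split <;> omega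

theorem pyGetD_slot {α : Type} (xs : List α) (hx : xs.length = 20001) (i : Int)
    (h1 : -20001 ≤ i) (h2 : i ≤ 20000) (d : α) :
    PySem.List.pyGetD xs i d = xs.getD (pvSlot i) d := by
  unfold pvSlot
  split
  · rw [PySem.List.pyGetD_eq_getElem (h0 := by omega) (h1 := by omega)]
    rw [List.getD_eq_getElem _ _ (by omega)]
  · have hk : i = -(((-i).toNat : Nat) : Int) := by omega
    rw [hk, PySem.List.pyGetD_neg_natCast (hk := by omega) (hk' := by omega)]
    rw [List.getD_eq_getElem _ _ (by omega)]
    congr 1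
    omega

theorem pySetD_slot {α : Type} (xs : List α) (hx : xs.length = 20001) (i : Int)
    (h1 : -20001 ≤ i) (h2 : i ≤ 20000) (v : α) :
    PySem.List.pySetD xs i v = xs.set (pvSlot i) v := by
  unfold pvSlot
  split
  · rw [PySem.List.pySetD_of_nonneg (h := by omega)]
  · simp only [PySem.List.pySetD, PySem.List.pySet?, PySem.List.pyIdx?]
    rw [if_neg (by omega), if_pos (by omega)]
    simp only [Option.map_some, Option.getD_some]
    congr 1
    omega

theorem pvGetD_set_ne {α : Type} (xs : List α) (i j : Nat) (v d : α) (h : i ≠ j) :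
    (xs.set i v).getD j d = xs.getD j d := by
  simp [List.getD, List.getElem?_set_ne h]

theorem pvGetD_set_self {α : Type} (xs : List α) (j : Nat) (v d : α) (h : j < xs.length) :
    (xs.set j v).getD j d = v := by
  simp [List.getD, List.getElem?_set_self h]

theorem pvJoin_nil_flatten (l : List (List Char)) : PySem.Chars.join [] l = l.flatten := by
  simp only [PySem.Chars.join, List.intercalate]
  induction l with
  | nil => rfl
  | cons x xs ih => cases xs <;> simp_all

/-- Ghost invariant: walking B's parent table from remainder `r` spells the digit string `s`,
every slot on the way is marked visited, and the length table records the string length. -/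
inductive pvChain (par : List (Option Int)) (dig : List (List Char)) (lenT : List Int)
    (vis : List Bool) : Int → List Char → Prop
  | root (hv : vis.getD (pvSlot 1) false = true) (hp : par.getD (pvSlot 1) none = none)
      (hd : dig.getD (pvSlot 1) [] = ['1']) (hl : lenT.getD (pvSlot 1) 0 = 1) :
      pvChain par dig lenT vis 1 ['1']
  | step (p r : Int) (s : List Char) (c : Char) (hc : pvChain par dig lenT vis p s)
      (hr1 : -20000 ≤ r) (hr2 : r ≤ 20000)
      (hv : vis.getD (pvSlot r) false = true) (hp : par.getD (pvSlot r) none = some p)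
      (hd : dig.getD (pvSlot r) [] = [c])
      (hl : lenT.getD (pvSlot r) 0 = (s.length : Int) + 1) :
      pvChain par dig lenT vis r (s ++ [c])

theorem pvChain_range {par dig lenT vis} {r : Int} {s : List Char}
    (h : pvChain par dig lenT vis r s) : -20000 ≤ r ∧ r ≤ 20000 := by
  cases h with
  | root _ _ _ _ => omega
  | step p r s c hc hr1 hr2 => exact ⟨hr1, hr2⟩

theorem pvChain_vis {par dig lenT vis} {r : Int} {s : List Char}
    (h : pvChain par dig lenT vis r s) : vis.getD (pvSlot r) false = true := by
  cases h with
  | root hv _ _ _ => exact hv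
  | step p r s c hc hr1 hr2 hv => exact hv

theorem pvChain_len {par dig lenT vis} {r : Int} {s : List Char}
    (h : pvChain par dig lenT vis r s) : lenT.getD (pvSlot r) 0 = (s.length : Int) := by
  cases h with
  | root _ _ _ hl => exact hl
  | step p r s c hc hr1 hr2 hv hp hd hl => simpa using hl

/-- Updating the tables at a not-yet-visited slot preserves every existing chain. -/
theorem pvChain_preserve {par dig lenT vis} {r : Int} {s : List Char}
    (sc : Nat) (hvc : vis.getD sc false = false)
    (v1 : Option Int) (v2 : List Char) (v3 : Int)
    (h : pvChain par dig lenT vis r s) :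
    pvChain (par.set sc v1) (dig.set sc v2) (lenT.set sc v3) (vis.set sc true) r s := by
  induction h with
  | root hv hp hd hl =>
    have hne : sc ≠ pvSlot 1 := fun he => by rw [he, hv] at hvc; cases hvc
    exact pvChain.root (by rw [pvGetD_set_ne _ _ _ _ _ hne]; exact hv)
      (by rw [pvGetD_set_ne _ _ _ _ _ hne]; exact hp)
      (by rw [pvGetD_set_ne _ _ _ _ _ hne]; exact hd)
      (by rw [pvGetD_set_ne _ _ _ _ _ hne]; exact hl)
  | step p r s c hc hr1 hr2 hv hp hd hl ih =>
    have hne : sc ≠ pvSlot r := fun he => by rw [he, hv] at hvc; cases hvc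
    exact pvChain.step p r s c ih hr1 hr2
      (by rw [pvGetD_set_ne _ _ _ _ _ hne]; exact hv)
      (by rw [pvGetD_set_ne _ _ _ _ _ hne]; exact hp)
      (by rw [pvGetD_set_ne _ _ _ _ _ hne]; exact hd)
      (by rw [pvGetD_set_ne _ _ _ _ _ hne]; exact hl)

theorem recon_spec {par : List (Option Int)} {dig : List (List Char)} {lenT vis}
    (hpar : par.length = 20001) (hdig : dig.length = 20001) {r : Int} {s : List Char}
    (h : pvChain par dig lenT vis r s) :
    ∀ (fuel : Nat) (acc : List (List Char)), s.length ≤ fuel →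
      PySem.Chars.join [] (reconLoop par dig fuel r acc).reverse
        = s ++ PySem.Chars.join [] acc.reverse := by
  induction h with
  | root hv hp hd hl =>
    intro fuel acc hf
    match fuel, hf with
    | fuel + 1, _ =>
      rw [reconLoop]
      simp only [pyGetD_slot par hpar 1 (by omega) (by omega),
        pyGetD_slot dig hdig 1 (by omega) (by omega), hp, hd]
      simp [pvJoin_nil_flatten]
  | step p r s c hc hr1 hr2 hv hp hd hl ih =>
    intro fuel acc hf
    match fuel, (by simpa using hf : s.length + 1 ≤ fuel) with
    | fuel + 1, hf' =>
      rw [reconLoop]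
      simp only [pyGetD_slot par hpar r (by omega) (by omega),
        pyGetD_slot dig hdig r (by omega) (by omega), hp, hd]
      rw [ih fuel _ (by omega)]
      simp [pvJoin_nil_flatten]

theorem pvMod_range (N x : Int) (hN0 : N ≠ 0) (hNl : -20001 ≤ N) (hNr : N ≤ 20001) :
    -20000 ≤ PySem.Int.mod x N ∧ PySem.Int.mod x N ≤ 20000 := by
  rcases lt_or_gt_of_ne hN0 with h | h
  · have := PySem.Int.mod_neg_bounds x (b := N) h
    omega
  · have h1 := PySem.Int.mod_nonneg x (b := N) h
    have h2 := PySem.Int.mod_lt x (b := N) h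
    omega

/-- The relation between an entry of A's queue and the corresponding entry of B's queue. -/
def pvRel (par : List (Option Int)) (dig : List (List Char)) (lenT : List Int)
    (vis : List Bool) (e : Int × List Char) (r : Int) : Prop :=
  e.1 = r ∧ e.2.length ≤ 101 ∧ pvChain par dig lenT vis r e.2

theorem loop_eq (N : Int) (hN0 : N ≠ 0) (hNl : -20001 ≤ N) (hNr : N ≤ 20001) :
    ∀ (fuel : Nat) (qA : List (Int × List Char)) (qB : List Int) (vis : List Bool)
      (par : List (Option Int)) (dig : List (List Char)) (lenT : List Int),
      vis.length = 20001 → par.length = 20001 → dig.length = 20001 → lenT.length = 20001 →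
      List.Forall₂ (pvRel par dig lenT vis) qA qB →
      BFSloop N fuel qA vis = BFSloopAlt N fuel qB vis par dig lenT := by
  intro fuel
  induction fuel with
  | zero => intro qA qB vis par dig lenT _ _ _ _ _; rfl
  | succ fuel ih =>
    intro qA qB vis par dig lenT hv hp hd hl hrel
    cases hrel with
    | nil => rfl
    | @cons e r qA' qB' hhead htail =>
      obtain ⟨num, s⟩ := e
      obtain ⟨hfst, hlen, hch⟩ := hhead
      cases hfst
      have hrange := pvChain_range hch
      rw [BFSloop, BFSloopAlt]
      by_cases h0 : PySem.Int.mod num N = 0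
      · simp only [h0, if_true]
        rw [recon_spec hp hd hch 100000 [] (by omega)]
        simp
      · have hB : PySem.List.pyGetD lenT num 0 = (s.length : Int) := by
          rw [pyGetD_slot lenT hl num (by omega) (by omega)]; exact pvChain_len hch
        simp only [h0, if_false, hB]
        by_cases hbig : (100 : Int) < (s.length : Int)
        · simp [hbig]
        · dsimp only at hlen hch hrange
          simp only [hbig, if_false, List.foldl]
          have hi1r := pvMod_range N (num * 10 + 1) hN0 hNl hNr
          have hi0r := pvMod_range N (num * 10) hN0 hNl hNr
          have hsc1 := pvSlot_lt (PySem.Int.mod (num * 10 + 1) N) (by omega) (by omega)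
          have hsc0 := pvSlot_lt (PySem.Int.mod (num * 10) N) (by omega) (by omega)
          have hscr := pvSlot_lt num (by omega) (by omega)
          have hvnum : vis.getD (pvSlot num) false = true := pvChain_vis hch
          have ht1 : PySem.Int.toChars 1 = ['1'] := by decide
          have ht0 : PySem.Int.toChars 0 = ['0'] := by decide
          by_cases h1 : PySem.List.pyGetD vis (PySem.Int.mod (num * 10 + 1) N) false = false
          · have hvc1 : vis.getD (pvSlot (PySem.Int.mod (num * 10 + 1) N)) false = false := by
              rw [← pyGetD_slot vis hv _ (by omega) (by omega)]; exact h1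
            have hne1 : pvSlot (PySem.Int.mod (num * 10 + 1) N) ≠ pvSlot num := by
              intro he; rw [he, hvnum] at hvc1; cases hvc1
            simp only [stepB, h1, if_true, add_zero]
            by_cases h2 : PySem.List.pyGetD (PySem.List.pySetD vis (PySem.Int.mod (num * 10 + 1) N) true)
                (PySem.Int.mod (num * 10) N) false = false
            · have hvc0 : (vis.set (pvSlot (PySem.Int.mod (num * 10 + 1) N)) true).getD
                  (pvSlot (PySem.Int.mod (num * 10) N)) false = false := by
                rw [← pyGetD_slot _ (by simp [hv]) _ (by omega) (by omega)]
                rw [← pySetD_slot vis hv _ (by omega) (by omega)]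
                exact h2
              simp only [h2, if_true]
              apply ih
              · rw [pySetD_slot vis hv _ (by omega) (by omega),
                  pySetD_slot (vis.set (pvSlot (PySem.Int.mod (num * 10 + 1) N)) true)
                    (by simp [hv]) _ (by omega) (by omega)]; simp [hv]
              · rw [pySetD_slot par hp _ (by omega) (by omega),
                  pySetD_slot (par.set (pvSlot (PySem.Int.mod (num * 10 + 1) N)) (some num))
                    (by simp [hp]) _ (by omega) (by omega)]; simp [hp]
              · rw [pySetD_slot dig hd _ (by omega) (by omega),
                  pySetD_slot (dig.set (pvSlot (PySem.Int.mod (num * 10 + 1) N)) (PySem.Int.toChars 1))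
                    (by simp [hd]) _ (by omega) (by omega)]; simp [hd]
              · rw [pySetD_slot lenT hl _ (by omega) (by omega),
                  pySetD_slot (lenT.set (pvSlot (PySem.Int.mod (num * 10 + 1) N)) (PySem.List.pyGetD lenT num 0 + 1))
                    (by simp [hl]) _ (by omega) (by omega)]; simp [hl]
              · -- the queue invariant after both children are enqueued
                rw [hB, ht1, ht0]
                rw [pySetD_slot vis hv _ (by omega) (by omega),
                  pySetD_slot par hp _ (by omega) (by omega),
                  pySetD_slot dig hd _ (by omega) (by omega),
                  pySetD_slot lenT hl _ (by omega) (by omega)]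
                have hB1 : PySem.List.pyGetD
                    (lenT.set (pvSlot (PySem.Int.mod (num * 10 + 1) N)) ((s.length : Int) + 1)) num 0
                    = (s.length : Int) := by
                  rw [pyGetD_slot (lenT.set (pvSlot (PySem.Int.mod (num * 10 + 1) N)) ((s.length : Int) + 1))
                      (by simp [hl]) num (by omega) (by omega),
                    pvGetD_set_ne _ _ _ _ _ hne1, ← pyGetD_slot lenT hl num (by omega) (by omega)]
                  exact hB
                rw [hB1]
                rw [pySetD_slot (vis.set (pvSlot (PySem.Int.mod (num * 10 + 1) N)) true)
                    (by simp [hv]) _ (by omega) (by omega),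
                  pySetD_slot (par.set (pvSlot (PySem.Int.mod (num * 10 + 1) N)) (some num))
                    (by simp [hp]) _ (by omega) (by omega),
                  pySetD_slot (dig.set (pvSlot (PySem.Int.mod (num * 10 + 1) N)) ['1'])
                    (by simp [hd]) _ (by omega) (by omega),
                  pySetD_slot (lenT.set (pvSlot (PySem.Int.mod (num * 10 + 1) N)) ((s.length : Int) + 1))
                    (by simp [hl]) _ (by omega) (by omega)]
                have hch1 : pvChain (par.set (pvSlot (PySem.Int.mod (num * 10 + 1) N)) (some num))
                    (dig.set (pvSlot (PySem.Int.mod (num * 10 + 1) N)) ['1'])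
                    (lenT.set (pvSlot (PySem.Int.mod (num * 10 + 1) N)) ((s.length : Int) + 1))
                    (vis.set (pvSlot (PySem.Int.mod (num * 10 + 1) N)) true)
                    (PySem.Int.mod (num * 10 + 1) N) (s ++ ['1']) :=
                  pvChain.step num _ s '1' (pvChain_preserve _ hvc1 _ _ _ hch) (by omega) (by omega)
                    (pvGetD_set_self _ _ _ _ (by rw [hv]; exact hsc1))
                    (pvGetD_set_self _ _ _ _ (by rw [hp]; exact hsc1))
                    (pvGetD_set_self _ _ _ _ (by rw [hd]; exact hsc1))
                    (pvGetD_set_self _ _ _ _ (by rw [hl]; exact hsc1))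
                have hch0 : pvChain
                    ((par.set (pvSlot (PySem.Int.mod (num * 10 + 1) N)) (some num)).set
                      (pvSlot (PySem.Int.mod (num * 10) N)) (some num))
                    ((dig.set (pvSlot (PySem.Int.mod (num * 10 + 1) N)) ['1']).set
                      (pvSlot (PySem.Int.mod (num * 10) N)) ['0'])
                    ((lenT.set (pvSlot (PySem.Int.mod (num * 10 + 1) N)) ((s.length : Int) + 1)).set
                      (pvSlot (PySem.Int.mod (num * 10) N)) ((s.length : Int) + 1))
                    ((vis.set (pvSlot (PySem.Int.mod (num * 10 + 1) N)) true).set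
                      (pvSlot (PySem.Int.mod (num * 10) N)) true)
                    (PySem.Int.mod (num * 10) N) (s ++ ['0']) :=
                  pvChain.step num _ s '0'
                    (pvChain_preserve _ hvc0 (some num) ['0'] ((s.length : Int) + 1)
                      (pvChain_preserve _ hvc1 (some num) ['1'] ((s.length : Int) + 1) hch))
                    (by omega) (by omega)
                    (pvGetD_set_self _ _ _ _ (by simp [hv]; exact hsc0))
                    (pvGetD_set_self _ _ _ _ (by simp [hp]; exact hsc0))
                    (pvGetD_set_self _ _ _ _ (by simp [hd]; exact hsc0))
                    (pvGetD_set_self _ _ _ _ (by simp [hl]; exact hsc0))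
                refine List.rel_append (List.rel_append
                    (htail.imp fun _ _ hr => ⟨hr.1, hr.2.1,
                      pvChain_preserve _ hvc0 (some num) ['0'] ((s.length : Int) + 1)
                        (pvChain_preserve _ hvc1 (some num) ['1'] ((s.length : Int) + 1) hr.2.2)⟩)
                    (List.Forall₂.cons ⟨rfl, by simp; omega,
                      pvChain_preserve _ hvc0 (some num) ['0'] ((s.length : Int) + 1) hch1⟩ List.Forall₂.nil))
                  (List.Forall₂.cons ⟨rfl, by simp; omega, hch0⟩ List.Forall₂.nil)
            · simp only [h2]
              apply ih
              · rw [pySetD_slot vis hv _ (by omega) (by omega)]; simp [hv]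
              · rw [pySetD_slot par hp _ (by omega) (by omega)]; simp [hp]
              · rw [pySetD_slot dig hd _ (by omega) (by omega)]; simp [hd]
              · rw [pySetD_slot lenT hl _ (by omega) (by omega)]; simp [hl]
              · rw [hB, ht1]
                rw [pySetD_slot vis hv _ (by omega) (by omega),
                  pySetD_slot par hp _ (by omega) (by omega),
                  pySetD_slot dig hd _ (by omega) (by omega),
                  pySetD_slot lenT hl _ (by omega) (by omega)]
                have hch1 : pvChain (par.set (pvSlot (PySem.Int.mod (num * 10 + 1) N)) (some num))
                    (dig.set (pvSlot (PySem.Int.mod (num * 10 + 1) N)) ['1'])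
                    (lenT.set (pvSlot (PySem.Int.mod (num * 10 + 1) N)) ((s.length : Int) + 1))
                    (vis.set (pvSlot (PySem.Int.mod (num * 10 + 1) N)) true)
                    (PySem.Int.mod (num * 10 + 1) N) (s ++ ['1']) :=
                  pvChain.step num _ s '1' (pvChain_preserve _ hvc1 _ _ _ hch) (by omega) (by omega)
                    (pvGetD_set_self _ _ _ _ (by rw [hv]; exact hsc1))
                    (pvGetD_set_self _ _ _ _ (by rw [hp]; exact hsc1))
                    (pvGetD_set_self _ _ _ _ (by rw [hd]; exact hsc1))
                    (pvGetD_set_self _ _ _ _ (by rw [hl]; exact hsc1))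
                exact List.rel_append
                  (htail.imp fun _ _ hr => ⟨hr.1, hr.2.1,
                    pvChain_preserve _ hvc1 (some num) ['1'] ((s.length : Int) + 1) hr.2.2⟩)
                  (List.Forall₂.cons ⟨rfl, by simp; omega, hch1⟩ List.Forall₂.nil)
          · simp only [stepB, h1, add_zero, Bool.true_eq_false, if_false]
            by_cases h2 : PySem.List.pyGetD vis (PySem.Int.mod (num * 10) N) false = false
            · have hvc0 : vis.getD (pvSlot (PySem.Int.mod (num * 10) N)) false = false := by
                rw [← pyGetD_slot vis hv _ (by omega) (by omega)]; exact h2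
              simp only [h2, if_true]
              apply ih
              · rw [pySetD_slot vis hv _ (by omega) (by omega)]; simp [hv]
              · rw [pySetD_slot par hp _ (by omega) (by omega)]; simp [hp]
              · rw [pySetD_slot dig hd _ (by omega) (by omega)]; simp [hd]
              · rw [pySetD_slot lenT hl _ (by omega) (by omega)]; simp [hl]
              · rw [hB, ht0]
                rw [pySetD_slot vis hv _ (by omega) (by omega),
                  pySetD_slot par hp _ (by omega) (by omega),
                  pySetD_slot dig hd _ (by omega) (by omega),
                  pySetD_slot lenT hl _ (by omega) (by omega)]
                have hch0 : pvChain (par.set (pvSlot (PySem.Int.mod (num * 10) N)) (some num))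
                    (dig.set (pvSlot (PySem.Int.mod (num * 10) N)) ['0'])
                    (lenT.set (pvSlot (PySem.Int.mod (num * 10) N)) ((s.length : Int) + 1))
                    (vis.set (pvSlot (PySem.Int.mod (num * 10) N)) true)
                    (PySem.Int.mod (num * 10) N) (s ++ ['0']) :=
                  pvChain.step num _ s '0' (pvChain_preserve _ hvc0 _ _ _ hch) (by omega) (by omega)
                    (pvGetD_set_self _ _ _ _ (by rw [hv]; exact hsc0))
                    (pvGetD_set_self _ _ _ _ (by rw [hp]; exact hsc0))
                    (pvGetD_set_self _ _ _ _ (by rw [hd]; exact hsc0))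
                    (pvGetD_set_self _ _ _ _ (by rw [hl]; exact hsc0))
                exact List.rel_append
                  (htail.imp fun _ _ hr => ⟨hr.1, hr.2.1,
                    pvChain_preserve _ hvc0 (some num) ['0'] ((s.length : Int) + 1) hr.2.2⟩)
                  (List.Forall₂.cons ⟨rfl, by simp; omega, hch0⟩ List.Forall₂.nil)
            · simp only [h2]
              exact ih _ _ _ _ _ _ hv hp hd hl htail

-- ===== VERDICT (by name: the statement is the Claim_ definition above) =====
theorem pvSlot_one : pvSlot 1 = 1 := by decide

theorem BFS_spec : Claim_equal_BFS := by
  intro N _ hpre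
  obtain ⟨hN0, hNl, hNr⟩ := hpre
  show BFS N = BFS_alt N
  unfold BFS BFS_alt
  rw [pySetD_slot (List.replicate 20001 false) (List.length_replicate) 1 (by omega) (by omega),
    pySetD_slot (List.replicate 20001 ([] : List Char)) (List.length_replicate) 1 (by omega) (by omega),
    pySetD_slot (List.replicate 20001 (0 : Int)) (List.length_replicate) 1 (by omega) (by omega)]
  apply loop_eq N hN0 hNl hNr
  · rw [List.length_set, List.length_replicate]
  · exact List.length_replicate
  · rw [List.length_set, List.length_replicate]
  · rw [List.length_set, List.length_replicate]
  · refine List.Forall₂.cons ⟨rfl, by norm_num, ?_⟩ List.Forall₂.nil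
    exact pvChain.root
      (by rw [pvSlot_one]; exact pvGetD_set_self _ _ _ _ (by rw [List.length_replicate]; omega))
      (by rw [pvSlot_one, List.getD_eq_getElem _ _ (by rw [List.length_replicate]; omega)]
          exact List.getElem_replicate ..)
      (by rw [pvSlot_one]; exact pvGetD_set_self _ _ _ _ (by rw [List.length_replicate]; omega))
      (by rw [pvSlot_one]; exact pvGetD_set_self _ _ _ _ (by rw [List.length_replicate]; omega))
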